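-- pv_equiv track=rewrite | github.com/xt3jas/Fresnel | stats.py | modal_verbs
-- ===== SOURCE A (Python) =====
-- def modal_verbs(words):
--     necessity = {"must", "should", "always", "will", "shall"}
--     possibility = {"might", "could", "maybe", "perhaps", "possibly"}
--     counts = {"necessity": 0, "possibility": 0}
--     for w in words:
--         if w in necessity:
--             counts["necessity"] += 1
--         elif w in possibility:
--             counts["possibility"] += 1
--     return counts
-- ===== SOURCE B (Python) =====
-- def modal_verbs(words):
--     necessity = ("must", "should", "always", "will", "shall")
--     possibility = ("might", "could", "maybe", "perhaps", "possibly")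
--     return {"necessity": sum(words.count(w) for w in necessity),
--             "possibility": sum(words.count(w) for w in possibility)}
-- ===== Notes on version B (the rewrite author's own statement) =====
-- stated objective: idiomatic
-- what changed: Inverts the traversal: instead of one loop over words with if/elif branch bookkeeping, B queries words.count(w) for each word of the two fixed modal vocabularies and sums, with no mutable state; correct because the vocabularies are disjoint sets of distinct words.
import Mathlib
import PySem

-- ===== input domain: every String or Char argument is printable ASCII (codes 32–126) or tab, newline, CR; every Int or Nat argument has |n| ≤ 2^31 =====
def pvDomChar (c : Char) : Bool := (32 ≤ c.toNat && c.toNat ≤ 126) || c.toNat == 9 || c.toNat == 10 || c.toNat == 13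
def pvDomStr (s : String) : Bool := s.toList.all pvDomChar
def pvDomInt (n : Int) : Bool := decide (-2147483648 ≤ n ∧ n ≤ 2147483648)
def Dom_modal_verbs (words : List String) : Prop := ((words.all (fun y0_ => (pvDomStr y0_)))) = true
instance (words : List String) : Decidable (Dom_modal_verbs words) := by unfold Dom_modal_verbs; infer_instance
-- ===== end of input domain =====

-- B replaces A's single mutating loop by summing words.count(w) over the two fixed vocabularies (idiomatic, no mutable state).

-- ===== PORT A =====
def modal_verbs (words : List String) : List (String × Int) :=
  let necessity : PySem.Set String := PySem.Set.ofList ["must", "should", "always", "will", "shall"]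
  let possibility : PySem.Set String := PySem.Set.ofList ["might", "could", "maybe", "perhaps", "possibly"]
  let counts : PySem.Dict String Int := (PySem.Dict.empty.insert "necessity" 0).insert "possibility" 0
  (words.foldl (fun (c : PySem.Dict String Int) w =>
    if PySem.Set.contains necessity w then PySem.Dict.modify c "necessity" 0 (fun v => v + 1)
    else if PySem.Set.contains possibility w then PySem.Dict.modify c "possibility" 0 (fun v => v + 1)
    else c) counts).items

-- ===== PORT B =====
def modal_verbs_alt (words : List String) : List (String × Int) :=
  let necessity := ["must", "should", "always", "will", "shall"]
  let possibility := ["might", "could", "maybe", "perhaps", "possibly"]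
  [("necessity", (necessity.map (fun w => (PySem.List.count words w : Int))).sum),
   ("possibility", (possibility.map (fun w => (PySem.List.count words w : Int))).sum)]

-- ===== PRECONDITION & SPEC =====
def Spec_modal_verbs (words : List String) (out : List (String × Int)) : Prop := out = modal_verbs_alt words
instance (words : List String) (out : List (String × Int)) : Decidable (Spec_modal_verbs words out) := by unfold Spec_modal_verbs; infer_instance

-- ===== CLAIM (what is proved, stated in full; the proofs are below) =====
def Claim_equal_modal_verbs : Prop := ∀ (words : List String), Dom_modal_verbs words → Spec_modal_verbs words (modal_verbs words)

-- ===== LEMMAS AND PROOFS =====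

theorem countP_or_disjoint {α : Type} (p q : α → Bool) (h : ∀ x, p x = true → q x = false)
    (ws : List α) : ws.countP (fun x => p x || q x) = ws.countP p + ws.countP q := by
  induction ws with
  | nil => simp
  | cons w ws ih =>
    simp only [List.countP_cons, ih]
    by_cases hp : p w = true
    · simp [hp, h w hp]; omega
    · simp at hp; simp [hp]; omega

theorem sum_counts (ks : List String) (hk : ks.Nodup) (ws : List String) :
    (ks.map (fun k => (PySem.List.count ws k : Int))).sum
      = (ws.countP (fun w => decide (w ∈ ks)) : Int) := by
  induction ks with
  | nil => simp
  | cons k ks ih =>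
    simp only [List.nodup_cons] at hk
    have hd : ws.countP (fun w => decide (w ∈ k :: ks))
        = ws.countP (fun w => w == k) + ws.countP (fun w => decide (w ∈ ks)) := by
      have := countP_or_disjoint (fun w => w == k) (fun w => decide (w ∈ ks))
        (by intro x hx; simp at hx ⊢; subst hx; exact hk.1) ws
      rw [← this]
      apply List.countP_congr
      intro w _
      simp [List.mem_cons]
    rw [List.map_cons, List.sum_cons, ih hk.2, hd]
    have hc : PySem.List.count ws k = ws.countP (fun w => w == k) := by
      simp [PySem.List.count_eq, List.count]
    rw [hc]
    push_cast
    ring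

-- the A-side fold, with the two counters generalized
theorem fold_eq (ws : List String) (n p : Int) :
    ws.foldl (fun (c : PySem.Dict String Int) w =>
      if PySem.Set.contains (PySem.Set.ofList ["must", "should", "always", "will", "shall"]) w
        then PySem.Dict.modify c "necessity" 0 (fun v => v + 1)
      else if PySem.Set.contains (PySem.Set.ofList ["might", "could", "maybe", "perhaps", "possibly"]) w
        then PySem.Dict.modify c "possibility" 0 (fun v => v + 1)
      else c) (PySem.Dict.mk [("necessity", n), ("possibility", p)])
    = PySem.Dict.mk [("necessity", n + (ws.countP (fun w => decide (w ∈ (["must", "should", "always", "will", "shall"] : List String))) : Int)),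
       ("possibility", p + (ws.countP (fun w => decide (w ∈ (["might", "could", "maybe", "perhaps", "possibly"] : List String))) : Int))] := by
  induction ws generalizing n p with
  | nil => simp
  | cons w ws ih =>
    simp only [List.foldl_cons, List.countP_cons]
    by_cases hN : w ∈ (["must", "should", "always", "will", "shall"] : List String)
    · have hc : PySem.Set.contains (PySem.Set.ofList ["must", "should", "always", "will", "shall"]) w = true := by
        simp [PySem.Set.mem_ofList, hN]
      have hP : w ∉ (["might", "could", "maybe", "perhaps", "possibly"] : List String) := by
        fin_cases hN <;> decide
      rw [hc]
      have hm : PySem.Dict.modify (PySem.Dict.mk [("necessity", n), ("possibility", p)])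
          "necessity" 0 (fun v => v + 1) = PySem.Dict.mk [("necessity", n + 1), ("possibility", p)] := by
        simp [PySem.Dict.modify, PySem.Dict.insert, PySem.Dict.getD, PySem.Dict.get?]
      rw [if_pos rfl, hm, ih]
      simp [hN, hP]
      ring_nf
    · by_cases hP : w ∈ (["might", "could", "maybe", "perhaps", "possibly"] : List String)
      · have hcN : PySem.Set.contains (PySem.Set.ofList ["must", "should", "always", "will", "shall"]) w = false := by
          simp [PySem.Set.mem_ofList, hN]
        have hcP : PySem.Set.contains (PySem.Set.ofList ["might", "could", "maybe", "perhaps", "possibly"]) w = true := by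
          simp [PySem.Set.mem_ofList, hP]
        have hm : PySem.Dict.modify (PySem.Dict.mk [("necessity", n), ("possibility", p)])
            "possibility" 0 (fun v => v + 1) = PySem.Dict.mk [("necessity", n), ("possibility", p + 1)] := by
          simp [PySem.Dict.modify, PySem.Dict.insert, PySem.Dict.getD, PySem.Dict.get?]
        rw [hcN, if_neg (by simp), hcP, if_pos rfl, hm, ih]
        simp [hN, hP]
        ring_nf
      · have hcN : PySem.Set.contains (PySem.Set.ofList ["must", "should", "always", "will", "shall"]) w = false := by
          simp [PySem.Set.mem_ofList, hN]
        have hcP : PySem.Set.contains (PySem.Set.ofList ["might", "could", "maybe", "perhaps", "possibly"]) w = false := by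
          simp [PySem.Set.mem_ofList, hP]
        rw [hcN, if_neg (by simp), hcP, if_neg (by simp), ih]
        simp [hN, hP]

-- ===== VERDICT (by name: the statement is the Claim_ definition above) =====
theorem modal_verbs_spec : Claim_equal_modal_verbs := by
  intro words _
  show modal_verbs words = modal_verbs_alt words
  simp only [modal_verbs, modal_verbs_alt]
  have h0 : ((PySem.Dict.empty.insert "necessity" 0).insert "possibility" (0 : Int))
      = PySem.Dict.mk [("necessity", (0 : Int)), ("possibility", 0)] := by decide
  rw [h0, fold_eq]
  rw [sum_counts ["must", "should", "always", "will", "shall"] (by decide) words,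
      sum_counts ["might", "could", "maybe", "perhaps", "possibly"] (by decide) words]
  simp
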